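-- pv_equiv track=rewrite | github.com/karthikm027/CovidPltINDvsITALY | covid19.py | date_convert
-- ===== SOURCE A (Python) =====
-- def date_convert(datelist,total_days_in):
-- 	for x in datelist:
-- 		month= int(x[5:7])
-- 		day= int(x[8:10])
-- 		days_in_month=[31,29,31,30,31,30,31,31,30,31,30,31]
-- 		total_month=-30    #Because first case was reported on jan 31st
-- 		for thismonth in range(month-2):
-- 			total_month+= days_in_month[thismonth]
-- 		total_days_in.append(day+total_month)
-- 	return total_days_in
-- ===== SOURCE B (Python) =====
-- def date_convert(datelist, total_days_in):
--     days_in_month = [31, 29, 31, 30, 31, 30, 31, 31, 30, 31, 30, 31]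
--     cum = [-30]
--     for d in days_in_month:
--         cum.append(cum[-1] + d)
--     for x in datelist:
--         month = int(x[5:7])
--         day = int(x[8:10])
--         total_days_in.append(day + cum[max(month - 2, 0)])
--     return total_days_in
-- ===== Notes on version B (the rewrite author's own statement) =====
-- stated objective: simpler
-- what changed: B precomputes a cumulative prefix table of month-start offsets once, turning A's per-date inner summation loop over days_in_month into a single table lookup.
import Mathlib
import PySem

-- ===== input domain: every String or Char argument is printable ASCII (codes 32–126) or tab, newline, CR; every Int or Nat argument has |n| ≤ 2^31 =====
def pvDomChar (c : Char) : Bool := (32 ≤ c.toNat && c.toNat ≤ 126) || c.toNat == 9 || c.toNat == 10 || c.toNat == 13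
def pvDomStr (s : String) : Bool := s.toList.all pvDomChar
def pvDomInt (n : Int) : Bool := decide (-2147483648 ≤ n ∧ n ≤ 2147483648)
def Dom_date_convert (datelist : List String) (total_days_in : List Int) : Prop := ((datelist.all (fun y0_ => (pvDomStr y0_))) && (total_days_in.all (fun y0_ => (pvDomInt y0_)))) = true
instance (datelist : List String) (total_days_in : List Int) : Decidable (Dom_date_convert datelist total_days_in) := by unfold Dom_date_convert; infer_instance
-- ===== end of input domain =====

-- B replaces the inner per-date summation loop by a cumulative prefix table built once (simpler; constant work per date).
-- Equivalence is about the RETURN value; both Pythons also append to total_days_in in place identically.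


-- ===== PORT A =====
def date_convert (datelist : List String) (total_days_in : List Int) : List Int :=
  datelist.foldl (fun acc x =>
    match PySem.Int.ofStr? (PySem.Str.slice x (some 5) (some 7)),
          PySem.Int.ofStr? (PySem.Str.slice x (some 8) (some 10)) with
    | some month, some day =>
        let days_in_month : List Int := [31, 29, 31, 30, 31, 30, 31, 31, 30, 31, 30, 31]
        let total_month : Int :=
          (PySem.List.pyRange 0 (month - 2) 1).foldl
            (fun t thismonth => t + (PySem.List.pyGet? days_in_month thismonth).getD 0) (-30)
        acc ++ [day + total_month]
    | _, _ => acc  -- int() raises ValueError: excluded by Pre_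
    ) total_days_in

-- ===== PORT B =====
def date_convert_alt (datelist : List String) (total_days_in : List Int) : List Int :=
  let days_in_month : List Int := [31, 29, 31, 30, 31, 30, 31, 31, 30, 31, 30, 31]
  let cum : List Int :=
    days_in_month.foldl (fun c d => c ++ [(PySem.List.pyGet? c (-1)).getD 0 + d]) [-30]
  datelist.foldl (fun acc x =>
    match PySem.Int.ofStr? (PySem.Str.slice x (some 5) (some 7)) with
    | none => acc
    | some month =>
        match PySem.Int.ofStr? (PySem.Str.slice x (some 8) (some 10)) with
        | none => acc
        | some day => acc ++ [day + (PySem.List.pyGet? cum (max (month - 2) 0)).getD 0]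
    ) total_days_in

-- ===== PRECONDITION & SPEC =====
-- Pre_ excludes exactly the inputs where A raises: a date string whose slice [5:7] or [8:10]
-- is not int()-parsable (ValueError), or month ≥ 15 (IndexError into days_in_month).
def Pre_date_convert (datelist : List String) (total_days_in : List Int) : Prop :=
  (datelist.all (fun x =>
    let m? := PySem.Int.ofStr? (PySem.Str.slice x (some 5) (some 7))
    let d? := PySem.Int.ofStr? (PySem.Str.slice x (some 8) (some 10))
    m?.isSome && d?.isSome && decide (m?.getD 0 ≤ 14))) = true
instance (datelist : List String) (total_days_in : List Int) : Decidable (Pre_date_convert datelist total_days_in) := by unfold Pre_date_convert; infer_instance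
def pvWitness_date_convert : List String × List Int := (["2020-03-15", "2020-01-31"], [0])

def Spec_date_convert (datelist : List String) (total_days_in : List Int) (out : List Int) : Prop := out = date_convert_alt datelist total_days_in
instance (datelist : List String) (total_days_in : List Int) (out : List Int) : Decidable (Spec_date_convert datelist total_days_in out) := by unfold Spec_date_convert; infer_instance

-- ===== CLAIM (what is proved, stated in full; the proofs are below) =====
def Claim_equal_date_convert : Prop := ∀ (datelist : List String) (total_days_in : List Int), Dom_date_convert datelist total_days_in → Pre_date_convert datelist total_days_in → Spec_date_convert datelist total_days_in (date_convert datelist total_days_in)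

-- ===== LEMMAS AND PROOFS =====

-- the per-date offset computed by A's inner loop equals B's table lookup, for every month ≤ 14
lemma offset_eq (month : Int) (hm : month ≤ 14) :
    (PySem.List.pyRange 0 (month - 2) 1).foldl
      (fun t thismonth => t + (PySem.List.pyGet? ([31, 29, 31, 30, 31, 30, 31, 31, 30, 31, 30, 31] : List Int) thismonth).getD 0) (-30)
    = (PySem.List.pyGet?
        (([31, 29, 31, 30, 31, 30, 31, 31, 30, 31, 30, 31] : List Int).foldl
          (fun c d => c ++ [(PySem.List.pyGet? c (-1)).getD 0 + d]) [-30])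
        (max (month - 2) 0)).getD 0 := by
  by_cases h0 : month - 2 ≤ 0
  · rw [PySem.List.pyRange_one_eq_nil h0]
    have : max (month - 2) 0 = 0 := by omega
    rw [this]
    decide
  · have hlo : 3 ≤ month := by omega
    interval_cases month <;> decide

-- ===== VERDICT (by name: the statement is the Claim_ definition above) =====
theorem date_convert_spec : Claim_equal_date_convert := by
  intro datelist total_days_in _ hpre
  unfold Spec_date_convert date_convert date_convert_alt
  simp only []
  apply PySem.List.foldl_congr_mem
  intro acc x hx
  unfold Pre_date_convert at hpre
  rw [List.all_eq_true] at hpre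
  have hx' := hpre x hx
  simp only at hx'
  cases hm : PySem.Int.ofStr? (PySem.Str.slice x (some 5) (some 7)) with
  | none => simp [hm] at hx'
  | some month =>
    cases hd : PySem.Int.ofStr? (PySem.Str.slice x (some 8) (some 10)) with
    | none => simp [hm, hd] at hx'
    | some day =>
      simp only [hm, hd] at hx' ⊢
      have hle : month ≤ 14 := by simpa using hx'
      rw [offset_eq month hle]
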